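-- pv_equiv track=rewrite | github.com/4-means/EDI_Doc_Validator | x12_validator.py | transaction_trailer_region
-- ===== SOURCE A (Python) =====
-- from typing import List, Tuple, Dict, Any, Optional
--
-- def transaction_trailer_region(block: List[Dict[str, Any]]) -> List[Dict[str, Any]]:
--     start = None
--     for i, s in enumerate(block):
--         if s["tag"] == "CTT":
--             start = i
--             break
--     if start is None:
--         for i, s in enumerate(block):
--             if s["tag"] == "SE":
--                 start = i
--                 break
--     return block[start:] if start is not None else []
-- ===== SOURCE B (Python) =====
-- from typing import List, Dict, Any
--
-- def transaction_trailer_region(block: List[Dict[str, Any]]) -> List[Dict[str, Any]]: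
--     ctt_idx = se_idx = None
--     for i, s in enumerate(block):
--         tag = s["tag"]
--         if tag == "CTT":
--             ctt_idx = i
--             break
--         if tag == "SE" and se_idx is None:
--             se_idx = i
--     start = ctt_idx if ctt_idx is not None else se_idx
--     return [] if start is None else block[start:]
-- ===== Notes on version B (the rewrite author's own statement) =====
-- stated objective: alternative
-- what changed: Replaces A's two sequential scans (first for CTT, then for SE) by a single pass that tracks both the first CTT index (breaking immediately, so CTT keeps priority) and the first SE index, then picks CTT over SE.
import Mathlib
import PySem

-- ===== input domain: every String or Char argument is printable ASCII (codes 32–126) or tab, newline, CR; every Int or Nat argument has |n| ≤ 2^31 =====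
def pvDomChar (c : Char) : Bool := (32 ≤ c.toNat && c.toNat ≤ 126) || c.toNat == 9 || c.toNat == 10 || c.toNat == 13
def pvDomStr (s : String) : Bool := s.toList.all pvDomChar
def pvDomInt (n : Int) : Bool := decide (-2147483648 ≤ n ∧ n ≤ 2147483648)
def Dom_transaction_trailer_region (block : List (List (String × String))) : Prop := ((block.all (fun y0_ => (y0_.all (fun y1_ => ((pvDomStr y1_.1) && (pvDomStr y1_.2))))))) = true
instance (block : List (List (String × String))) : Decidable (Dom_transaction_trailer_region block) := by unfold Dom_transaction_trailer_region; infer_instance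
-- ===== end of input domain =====

-- B replaces A's two sequential scans by one pass tracking both the first CTT and first SE index (alternative decomposition, same return value).


-- ===== PORT A =====
-- s["tag"] on the association-list dict: first match, "" if the key is absent
-- (exact wherever the Python does not raise KeyError; those inputs are outside Pre_)
def pvTag (s : List (String × String)) : String := PySem.Dict.getD (PySem.Dict.mk s) "tag" ""

-- A's 'for i, s in enumerate(block): if s["tag"] == tag: start = i; break' loop
def pvA_find (tag : String) : List (List (String × String)) → Nat → Option Nat
  | [], _ => none
  | s :: rest, i => if pvTag s = tag then some i else pvA_find tag rest (i + 1)

def transaction_trailer_region (block : List (List (String × String))) : List (List (String × String)) :=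
  let start := pvA_find "CTT" block 0
  let start := match start with
    | some i => some i
    | none => pvA_find "SE" block 0
  match start with
  | some i => block.drop i      -- block[start:] for 0 ≤ start: exact
  | none => []

-- ===== PORT B =====
-- one pass: se carries the first SE index seen so far; CTT returns immediately
def pvB_loop : List (List (String × String)) → Nat → Option Nat → Option Nat
  | [], _, se => se
  | s :: rest, i, se =>
    let tag := pvTag s
    if tag = "CTT" then some i
    else pvB_loop rest (i + 1) (if tag = "SE" ∧ se = none then some i else se)

def transaction_trailer_region_alt (block : List (List (String × String))) : List (List (String × String)) :=
  match pvB_loop block 0 none with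
  | some i => block.drop i
  | none => []

-- ===== PRECONDITION & SPEC =====
-- Pre_ excludes exactly the inputs on which the Python A raises KeyError: a segment
-- without a "tag" key is reached before any "CTT" segment.
def Pre_transaction_trailer_region (block : List (List (String × String))) : Prop :=
  (block.all (fun s => (PySem.Dict.get? (PySem.Dict.mk s) "tag").isSome)
    || (block.takeWhile (fun s => (PySem.Dict.get? (PySem.Dict.mk s) "tag").isSome)).any
         (fun s => pvTag s == "CTT")) = true
instance (block : List (List (String × String))) : Decidable (Pre_transaction_trailer_region block) := by
  unfold Pre_transaction_trailer_region; infer_instance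

def pvWitness_transaction_trailer_region : (List (List (String × String))) := [[("tag", "SE"), ("n", "1")]]

def Spec_transaction_trailer_region (block : List (List (String × String))) (out : List (List (String × String))) : Prop := out = transaction_trailer_region_alt block
instance (block : List (List (String × String))) (out : List (List (String × String))) : Decidable (Spec_transaction_trailer_region block out) := by unfold Spec_transaction_trailer_region; infer_instance

-- ===== CLAIM (what is proved, stated in full; the proofs are below) =====
def Claim_equal_transaction_trailer_region : Prop := ∀ (block : List (List (String × String))), Dom_transaction_trailer_region block → Pre_transaction_trailer_region block → Spec_transaction_trailer_region block (transaction_trailer_region block)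

-- ===== LEMMAS AND PROOFS =====
lemma pvB_loop_eq (block : List (List (String × String))) :
    ∀ (i : Nat) (se : Option Nat),
      pvB_loop block i se =
        match pvA_find "CTT" block i with
        | some j => some j
        | none => match se with
          | some k => some k
          | none => pvA_find "SE" block i := by
  induction block with
  | nil => intro i se; cases se <;> simp [pvB_loop, pvA_find]
  | cons s rest ih =>
    intro i se
    simp only [pvB_loop, pvA_find]
    by_cases hc : pvTag s = "CTT"
    · simp [hc]
    · simp only [hc, if_false]
      rw [ih]
      cases hfind : pvA_find "CTT" rest (i + 1) with
      | some j => simp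
      | none =>
        cases se with
        | some k => simp
        | none =>
          by_cases hs : pvTag s = "SE" <;> simp [hs]

-- ===== VERDICT (by name: the statement is the Claim_ definition above) =====
theorem transaction_trailer_region_spec : Claim_equal_transaction_trailer_region := by
  intro block _ _
  unfold Spec_transaction_trailer_region transaction_trailer_region transaction_trailer_region_alt
  rw [pvB_loop_eq]
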